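-- pv_equiv track=rewrite | github.com/gcallah/Emu86 | tests/Intel/test_assemble.py | bit_scan_operation
-- ===== SOURCE A (Python) =====
-- def bit_scan_operation(num, bsf=True):
--     if num == 0:
--         zero_flag = 1
--         return 0, zero_flag
--
--     else:
--         zero_flag = 0
--         if num.bit_length() <= 16:
--             bit_size = 16
--         else:
--             bit_size = 32
--         if bsf is True:
--             bin_str = str(bin(num))[2:].zfill(bit_size)[::-1]
--         else:
--             bin_str = str(bin(num))[2:].zfill(bit_size)
--
--         for index in range(len(bin_str)):
--             if bin_str[index] == '1':
--                 break
--         if not bsf: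
--             index = bit_size - index
--         return index, zero_flag
-- ===== SOURCE B (Python) =====
-- def bit_scan_operation(num, bsf=True):
--     if num == 0:
--         return 0, 1
--     if bsf:
--         n = abs(num)
--         index = 0
--         while n % 2 == 0:
--             n //= 2
--             index += 1
--         return index, 0
--     return num.bit_length(), 0
-- ===== Notes on version B (the rewrite author's own statement) =====
-- stated objective: simpler
-- what changed: Replaces A's build-a-zero-filled-binary-string-and-scan-characters approach with direct integer arithmetic: a divide-by-2 loop counting trailing zeros for BSF and int.bit_length() for BSR, no strings at all.
-- intended difference: For negative num with bsf falsy whose bit_length is exactly 16 or 32, A's binary string (bin(num)[2:] keeps a 'b' prefix) is longer than bit_size so zfill adds no padding and the scan is shifted: A returns (bit_length-1, 0) while B returns (bit_length, 0), the value A itself returns for every other magnitude, so B's is the intended one. — e.g. on bit_scan_operation(-32768, false): A returns (15, 0), B returns (16, 0)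
import Mathlib
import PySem

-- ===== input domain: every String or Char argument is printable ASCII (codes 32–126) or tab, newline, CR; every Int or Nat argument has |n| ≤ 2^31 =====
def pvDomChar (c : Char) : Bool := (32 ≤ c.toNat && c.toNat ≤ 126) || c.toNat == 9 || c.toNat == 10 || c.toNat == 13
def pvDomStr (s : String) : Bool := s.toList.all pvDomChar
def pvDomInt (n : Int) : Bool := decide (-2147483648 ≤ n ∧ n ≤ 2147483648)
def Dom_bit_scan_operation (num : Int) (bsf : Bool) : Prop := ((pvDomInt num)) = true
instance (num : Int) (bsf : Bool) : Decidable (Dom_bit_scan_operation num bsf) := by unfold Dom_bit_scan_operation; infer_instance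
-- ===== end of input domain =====

-- B replaces A's binary-string building and character scan by plain integer arithmetic
-- (a divide-by-2 loop for BSF, bit_length for BSR); equivalent outside D_ below.

-- ===== PORT A =====

-- Python int.bit_length(): number of halvings of |n| until 0.  Fuel = n is enough since n/2 < n;
-- exact for every Nat (bit_length(0) = 0).
def bitLenF : Nat → Nat → Nat
  | 0, _ => 0
  | _ + 1, 0 => 0
  | fuel + 1, n + 1 => bitLenF fuel ((n + 1) / 2) + 1

def intBitLength (num : Int) : Nat := bitLenF num.natAbs num.natAbs

-- binary digits of n, most significant first (bin(n) for n > 0, without the '0b'); fuel = n suffices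
def binDigitsF : Nat → Nat → List Char
  | 0, _ => []
  | _ + 1, 0 => []
  | fuel + 1, n + 1 => binDigitsF fuel ((n + 1) / 2) ++ [if (n + 1) % 2 = 1 then '1' else '0']

def binDigits (n : Nat) : List Char := binDigitsF n n

-- str(bin(num))[2:] : for num < 0 Python gives '-0b…' so [2:] keeps a 'b' prefix; bin(0)[2:] = "0"
def pyBinTail (num : Int) : List Char :=
  if num = 0 then ['0']
  else if num < 0 then 'b' :: binDigits num.natAbs
  else binDigits num.natAbs

-- s.zfill(w): pad '0' on the left (exact here: our strings never start with a sign character)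
def zfillChars (s : List Char) (w : Nat) : List Char := List.replicate (w - s.length) '0' ++ s

-- A's scan loop: index of the first '1', or len-1 if none (the loop variable's final value); 0 on []
def firstOneIdx : List Char → Nat
  | [] => 0
  | c :: rest => if c = '1' then 0 else if rest.isEmpty then 0 else firstOneIdx rest + 1

def bit_scan_operation (num : Int) (bsf : Bool) : Int × Int :=
  if num = 0 then (0, 1)
  else
    let bitSize : Nat := if intBitLength num ≤ 16 then 16 else 32
    let binStr : List Char :=
      if bsf then (zfillChars (pyBinTail num) bitSize).reverse
      else zfillChars (pyBinTail num) bitSize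
    let index : Nat := firstOneIdx binStr
    let index' : Int := if !bsf then (bitSize : Int) - (index : Int) else (index : Int)
    (index', 0)

-- ===== PORT B =====

-- B's while-loop: while n % 2 == 0: n //= 2; index += 1.  Fuel = n suffices (n/2 < n);
-- exact for n > 0 (on n = 0 Python would loop forever — unreachable, num ≠ 0 there).
def tzLoopF : Nat → Nat → Nat
  | 0, _ => 0
  | _ + 1, 0 => 0
  | fuel + 1, n + 1 => if (n + 1) % 2 = 0 then tzLoopF fuel ((n + 1) / 2) + 1 else 0

def tzLoop (n : Nat) : Nat := tzLoopF n n

def bit_scan_operation_alt (num : Int) (bsf : Bool) : Int × Int :=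
  if num = 0 then (0, 1)
  else if bsf then ((tzLoop num.natAbs : Int), 0)
  else ((intBitLength num : Int), 0)

-- ===== PRECONDITION & SPEC =====
-- For negative num with bsf = false whose bit_length is exactly 16 or 32, A returns
-- (bit_length-1, 0) — bin(num)[2:] keeps a 'b' prefix, so the string is longer than bit_size,
-- zfill adds no padding and the scan is shifted by one — while B returns (bit_length, 0),
-- the value A itself returns for every other magnitude, so B's is the intended value.
def D_bit_scan_operation (num : Int) (bsf : Bool) : Prop :=
  num < 0 ∧ bsf = false ∧
    ((32768 ≤ -num ∧ -num < 65536) ∨ (2147483648 ≤ -num ∧ -num < 4294967296))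
instance (num : Int) (bsf : Bool) : Decidable (D_bit_scan_operation num bsf) := by
  unfold D_bit_scan_operation; infer_instance

def Spec_bit_scan_operation (num : Int) (bsf : Bool) (out : Int × Int) : Prop :=
  ¬ D_bit_scan_operation num bsf → out = bit_scan_operation_alt num bsf
instance (num : Int) (bsf : Bool) (out : Int × Int) : Decidable (Spec_bit_scan_operation num bsf out) := by
  unfold Spec_bit_scan_operation; infer_instance

def pvDiffWitness_bit_scan_operation : Int × Bool := (-32768, false)
def pvDiffWitnessOut_bit_scan_operation : (Int × Int) × (Int × Int) := ((15, 0), (16, 0))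

-- ===== CLAIM (what is proved, stated in full; the proofs are below) =====
def Claim_unchanged_bit_scan_operation : Prop := ∀ (num : Int) (bsf : Bool), Dom_bit_scan_operation num bsf → Spec_bit_scan_operation num bsf (bit_scan_operation num bsf)
def Claim_changed_bit_scan_operation : Prop := Dom_bit_scan_operation (pvDiffWitness_bit_scan_operation.1) (pvDiffWitness_bit_scan_operation.2) ∧ D_bit_scan_operation (pvDiffWitness_bit_scan_operation.1) (pvDiffWitness_bit_scan_operation.2) ∧ bit_scan_operation (pvDiffWitness_bit_scan_operation.1) (pvDiffWitness_bit_scan_operation.2) = pvDiffWitnessOut_bit_scan_operation.1 ∧ bit_scan_operation_alt (pvDiffWitness_bit_scan_operation.1) (pvDiffWitness_bit_scan_operation.2) = pvDiffWitnessOut_bit_scan_operation.2 ∧ pvDiffWitnessOut_bit_scan_operation.1 ≠ pvDiffWitnessOut_bit_scan_operation.2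
def Claim_exact_bit_scan_operation : Prop := ∀ (num : Int) (bsf : Bool), Dom_bit_scan_operation num bsf → D_bit_scan_operation num bsf → bit_scan_operation num bsf ≠ bit_scan_operation_alt num bsf

-- ===== LEMMAS AND PROOFS =====

theorem bitLenF_mono : ∀ (f f' n : Nat), n ≤ f → n ≤ f' → bitLenF f n = bitLenF f' n := by
  intro f
  induction f with
  | zero => intro f' n h _; interval_cases n; cases f' <;> rfl
  | succ f ih =>
    intro f' n h h'
    match n, f' with
    | 0, 0 => rfl
    | 0, g + 1 => rfl
    | m + 1, g + 1 =>
      simp only [bitLenF]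
      rw [ih g ((m + 1) / 2) (by omega) (by omega)]

theorem binDigitsF_mono : ∀ (f f' n : Nat), n ≤ f → n ≤ f' → binDigitsF f n = binDigitsF f' n := by
  intro f
  induction f with
  | zero => intro f' n h _; interval_cases n; cases f' <;> rfl
  | succ f ih =>
    intro f' n h h'
    match n, f' with
    | 0, 0 => rfl
    | 0, g + 1 => rfl
    | m + 1, g + 1 =>
      simp only [binDigitsF]
      rw [ih g ((m + 1) / 2) (by omega) (by omega)]

theorem tzLoopF_mono : ∀ (f f' n : Nat), n ≤ f → n ≤ f' → tzLoopF f n = tzLoopF f' n := by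
  intro f
  induction f with
  | zero => intro f' n h _; interval_cases n; cases f' <;> rfl
  | succ f ih =>
    intro f' n h h'
    match n, f' with
    | 0, 0 => rfl
    | 0, g + 1 => rfl
    | m + 1, g + 1 =>
      simp only [tzLoopF]
      rw [ih g ((m + 1) / 2) (by omega) (by omega)]

theorem bitLen_succ (n : Nat) (h : n ≠ 0) :
    bitLenF n n = bitLenF (n / 2) (n / 2) + 1 := by
  match n, h with
  | m + 1, _ =>
    simp only [bitLenF]
    rw [bitLenF_mono m ((m + 1) / 2) ((m + 1) / 2) (by omega) le_rfl]

theorem binDigits_succ (n : Nat) (h : n ≠ 0) :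
    binDigits n = binDigits (n / 2) ++ [if n % 2 = 1 then '1' else '0'] := by
  match n, h with
  | m + 1, _ =>
    simp only [binDigits, binDigitsF]
    rw [binDigitsF_mono m ((m + 1) / 2) ((m + 1) / 2) (by omega) le_rfl]

theorem tzLoop_even (n : Nat) (h : n ≠ 0) (he : n % 2 = 0) :
    tzLoop n = tzLoop (n / 2) + 1 := by
  match n, h with
  | m + 1, _ =>
    simp only [tzLoop, tzLoopF, he, if_pos]
    rw [tzLoopF_mono m ((m + 1) / 2) ((m + 1) / 2) (by omega) le_rfl]

theorem tzLoop_odd (n : Nat) (he : n % 2 = 1) : tzLoop n = 0 := by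
  match n with
  | m + 1 => simp only [tzLoop, tzLoopF, he]; simp

theorem binDigits_ne_nil (n : Nat) (h : n ≠ 0) : binDigits n ≠ [] := by
  rw [binDigits_succ n h]; simp

theorem binDigits_head (n : Nat) (h : n ≠ 0) : ∃ t, binDigits n = '1' :: t := by
  induction n using Nat.strong_induction_on with
  | _ n ih =>
    rw [binDigits_succ n h]
    by_cases h2 : n / 2 = 0
    · have : n % 2 = 1 := by omega
      simp [binDigits, h2, binDigitsF, this]
    · obtain ⟨t, ht⟩ := ih (n / 2) (by omega) h2
      exact ⟨t ++ [if n % 2 = 1 then '1' else '0'], by rw [ht]; rfl⟩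

theorem binDigits_length (n : Nat) (h : n ≠ 0) : (binDigits n).length = bitLenF n n := by
  induction n using Nat.strong_induction_on with
  | _ n ih =>
    rw [binDigits_succ n h, bitLen_succ n h]
    by_cases h2 : n / 2 = 0
    · simp [binDigits, h2, binDigitsF, bitLenF]
    · simp [ih (n / 2) (by omega) h2]

theorem bitLen_le (k : Nat) : ∀ n, n < 2 ^ k → bitLenF n n ≤ k := by
  induction k with
  | zero => intro n h; interval_cases n; simp [bitLenF]
  | succ k ih =>
    intro n h
    by_cases h0 : n = 0
    · simp [h0, bitLenF]
    · rw [bitLen_succ n h0]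
      have : n / 2 < 2 ^ k := by
        have := Nat.pow_succ 2 k ▸ h
        omega
      exact Nat.succ_le_succ (ih (n / 2) this)

theorem le_bitLen (k : Nat) : ∀ n, 2 ^ k ≤ n → k + 1 ≤ bitLenF n n := by
  induction k with
  | zero =>
    intro n h
    rw [bitLen_succ n (by omega)]
    omega
  | succ k ih =>
    intro n h
    have h0 : n ≠ 0 := by have := Nat.two_pow_pos (k + 1); omega
    rw [bitLen_succ n h0]
    have : 2 ^ k ≤ n / 2 := by
      have := Nat.pow_succ 2 k ▸ h
      omega
    exact Nat.succ_le_succ (ih (n / 2) this)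

theorem firstOneIdx_rev_binDigits (n : Nat) (h : n ≠ 0) :
    ∀ t, firstOneIdx ((binDigits n).reverse ++ t) = tzLoop n := by
  induction n using Nat.strong_induction_on with
  | _ n ih =>
    intro t
    rw [binDigits_succ n h]
    simp only [List.reverse_append, List.reverse_singleton, List.cons_append]
    rcases Nat.mod_two_eq_zero_or_one n with he | ho
    · have h2 : n / 2 ≠ 0 := by omega
      have hne : (binDigits (n / 2)).reverse ++ t ≠ [] := by
        simp [binDigits_ne_nil (n / 2) h2]
      rw [tzLoop_even n h he]
      simp only [he, firstOneIdx]
      rw [if_neg (by decide), if_neg (by simpa [List.isEmpty_iff] using hne)]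
      rw [List.nil_append, ih (n / 2) (by omega) h2 t]
    · rw [tzLoop_odd n ho]
      simp [ho, firstOneIdx]

theorem firstOneIdx_replicate (k : Nat) :
    ∀ l, '1' ∈ l → firstOneIdx (List.replicate k '0' ++ l) = k + firstOneIdx l := by
  induction k with
  | zero => intro l _; simp
  | succ k ih =>
    intro l hl
    have hne : List.replicate k '0' ++ l ≠ [] := by
      have : l ≠ [] := by rintro rfl; simp at hl
      simp [this]
    rw [List.replicate_succ, List.cons_append]
    simp only [firstOneIdx]
    rw [if_neg (by decide), if_neg (by simpa [List.isEmpty_iff] using hne), ih l hl]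
    omega

-- ===== VERDICT (by name: the statement is the Claim_ definition above) =====
theorem pyBinTail_mem_one (num : Int) (h0 : num ≠ 0) : '1' ∈ pyBinTail num := by
  obtain ⟨t, ht⟩ := binDigits_head num.natAbs (by simpa using h0)
  unfold pyBinTail
  rw [if_neg h0]
  split <;> simp [ht]

theorem firstOneIdx_pyBinTail (num : Int) (h0 : num ≠ 0) :
    firstOneIdx (pyBinTail num) = if num < 0 then 1 else 0 := by
  obtain ⟨t, ht⟩ := binDigits_head num.natAbs (by simpa using h0)
  unfold pyBinTail
  rw [if_neg h0]
  split <;> simp [ht, firstOneIdx]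

theorem pyBinTail_length (num : Int) (h0 : num ≠ 0) :
    (pyBinTail num).length =
      (if num < 0 then 1 else 0) + bitLenF num.natAbs num.natAbs := by
  unfold pyBinTail
  rw [if_neg h0]
  split <;>
    simp [show (binDigits num.natAbs).length = bitLenF num.natAbs num.natAbs from
      binDigits_length num.natAbs (by simpa using h0), Nat.add_comm]

theorem bit_scan_operation_spec : Claim_unchanged_bit_scan_operation := by
  intro num bsf hdom hD
  by_cases h0 : num = 0
  · simp [bit_scan_operation, bit_scan_operation_alt, h0]
  have hn : num.natAbs ≠ 0 := by simpa using h0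
  have hdom' : num.natAbs ≤ 2147483648 := by
    have : pvDomInt num = true := hdom
    simp only [pvDomInt, decide_eq_true_eq] at this
    omega
  have hbl32 : bitLenF num.natAbs num.natAbs ≤ 32 := bitLen_le 32 num.natAbs (by omega)
  cases bsf with
  | true =>
    simp only [bit_scan_operation, bit_scan_operation_alt, if_neg h0, Bool.not_true,
      if_true, if_false, Bool.false_eq_true]
    congr 1
    unfold zfillChars
    rw [List.reverse_append, List.reverse_replicate]
    unfold pyBinTail
    rw [if_neg h0]
    split
    · rw [List.reverse_cons, List.append_assoc]
      exact congrArg _ (firstOneIdx_rev_binDigits num.natAbs hn _)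
    · exact congrArg _ (firstOneIdx_rev_binDigits num.natAbs hn _)
  | false =>
    simp only [bit_scan_operation, bit_scan_operation_alt, if_neg h0, Bool.not_false,
      if_true, Bool.false_eq_true, reduceIte, intBitLength, zfillChars]
    rw [firstOneIdx_replicate _ _ (pyBinTail_mem_one num h0),
      firstOneIdx_pyBinTail num h0, pyBinTail_length num h0]
    rw [Prod.mk.injEq]
    refine ⟨?_, rfl⟩
    by_cases hneg : num < 0
    · -- negative: ¬ D_ bounds the bit length away from 16 and 32, so the 'b' fits in bit_size
      have hcase : num.natAbs < 32768 ∨ (65536 ≤ num.natAbs ∧ num.natAbs < 2147483648) := by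
        have hDn : ¬ ((32768 ≤ -num ∧ -num < 65536) ∨
            (2147483648 ≤ -num ∧ -num < 4294967296)) := fun hband => hD ⟨hneg, rfl, hband⟩
        omega
      rcases hcase with hsm | ⟨hlo, hhi⟩
      · have h15 : bitLenF num.natAbs num.natAbs ≤ 15 := bitLen_le 15 num.natAbs (by omega)
        simp only [if_pos (show bitLenF num.natAbs num.natAbs ≤ 16 by omega), if_pos hneg]
        push_cast
        omega
      · have h17 : 17 ≤ bitLenF num.natAbs num.natAbs := le_bitLen 16 num.natAbs (by omega)
        have h31 : bitLenF num.natAbs num.natAbs ≤ 31 := bitLen_le 31 num.natAbs (by omega)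
        simp only [if_neg (show ¬ bitLenF num.natAbs num.natAbs ≤ 16 by omega), if_pos hneg]
        push_cast
        omega
    · -- nonnegative: the string is exactly the digits and zfill pads it to bit_size
      have h1 : 1 ≤ bitLenF num.natAbs num.natAbs := le_bitLen 0 num.natAbs (by omega)
      by_cases h16 : bitLenF num.natAbs num.natAbs ≤ 16
      · simp only [if_pos h16, if_neg hneg]
        push_cast
        omega
      · simp only [if_neg h16, if_neg hneg]
        push_cast
        omega

theorem bit_scan_operation_changed : Claim_changed_bit_scan_operation := by
  unfold Claim_changed_bit_scan_operation; decide

theorem bit_scan_operation_tight : Claim_exact_bit_scan_operation := by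
  intro num bsf hdom hD
  obtain ⟨hneg, hbsf, hband⟩ := hD
  subst hbsf
  have h0 : num ≠ 0 := by omega
  simp only [bit_scan_operation, bit_scan_operation_alt, if_neg h0, Bool.not_false,
    if_true, Bool.false_eq_true, reduceIte, intBitLength, zfillChars]
  rw [firstOneIdx_replicate _ _ (pyBinTail_mem_one num h0),
    firstOneIdx_pyBinTail num h0, pyBinTail_length num h0]
  intro heq
  have hfst := congrArg Prod.fst heq
  simp only [if_pos hneg] at hfst
  rcases hband with ⟨hlo, hhi⟩ | ⟨hlo, hhi⟩
  · have hA : bitLenF num.natAbs num.natAbs = 16 := by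
      have := le_bitLen 15 num.natAbs (by omega)
      have := bitLen_le 16 num.natAbs (by omega)
      omega
    simp only [hA] at hfst
    norm_num at hfst
  · have hA : bitLenF num.natAbs num.natAbs = 32 := by
      have := le_bitLen 31 num.natAbs (by omega)
      have := bitLen_le 32 num.natAbs (by omega)
      omega
    simp only [hA] at hfst
    norm_num at hfst
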